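-- pv_equiv track=rewrite | github.com/inkwonjung-colosseum/plugins | confluence-export-kit/skills/index-export/scripts/index_export.py | render_root_stats
-- ===== SOURCE A (Python) =====
-- def render_root_stats(registry: dict[str, object]) -> str:
--     sources = list(registry.get("sources", []))
--     file_count = sum(int(source.get("file_count", 0)) for source in sources)
--     word_count = sum(int(source.get("word_count", 0)) for source in sources)
--     lines = [
--         "# Confluence Export Index Stats",
--         "",
--         f"- Sources: {len(sources)}",
--         f"- Files: {file_count}",
--         f"- Words: {word_count}",
--     ]
--     return "\n".join(lines) + "\n"
-- ===== SOURCE B (Python) =====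
-- def _tally(sources):
--     """Recursively reduce the source list (right to left) to a
--     (count, total files, total words) triple."""
--     if not sources:
--         return (0, 0, 0)
--     n, f, w = _tally(sources[1:])
--     head = sources[0]
--     return (n + 1,
--             int(head.get("file_count", 0)) + f,
--             int(head.get("word_count", 0)) + w)
--
--
-- def render_root_stats(registry: dict[str, object]) -> str:
--     n, file_count, word_count = _tally(list(registry.get("sources", [])))
--     return (
--         "# Confluence Export Index Stats\n"
--         "\n"
--         f"- Sources: {n}\n"
--         f"- Files: {file_count}\n"
--         f"- Words: {word_count}\n"
--     )
-- ===== Notes on version B (the rewrite author's own statement) =====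
-- stated objective: alternative
-- what changed: A's len() plus two separate sum() generator passes are replaced by one structural recursion over the source list that returns a (count, files, words) triple in a single traversal, and the list-of-lines join is replaced by one flat template.
import Mathlib
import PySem

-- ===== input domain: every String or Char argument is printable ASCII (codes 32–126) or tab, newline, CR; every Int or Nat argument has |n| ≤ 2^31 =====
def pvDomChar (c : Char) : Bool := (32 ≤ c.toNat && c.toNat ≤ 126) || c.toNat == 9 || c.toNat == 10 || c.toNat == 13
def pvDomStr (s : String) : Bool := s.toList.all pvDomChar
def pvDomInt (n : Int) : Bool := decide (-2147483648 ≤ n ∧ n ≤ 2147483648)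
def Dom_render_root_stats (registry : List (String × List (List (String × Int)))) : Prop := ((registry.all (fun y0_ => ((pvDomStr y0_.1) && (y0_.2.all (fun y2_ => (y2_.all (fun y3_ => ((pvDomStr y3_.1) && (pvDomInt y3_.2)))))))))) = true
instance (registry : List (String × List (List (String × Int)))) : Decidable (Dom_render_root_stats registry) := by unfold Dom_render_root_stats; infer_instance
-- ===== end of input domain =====

-- B replaces A's len() plus two sum() passes by one structural recursion returning a (count, files, words) triple, and the joined line list by one flat template (alternative decomposition, same cost).

-- ===== PORT A =====
def render_root_stats (registry : List (String × List (List (String × Int)))) : String :=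
  let sources := (PySem.Dict.mk registry).getD "sources" []
  let file_count := (sources.map (fun source => (PySem.Dict.mk source).getD "file_count" 0)).sum
  let word_count := (sources.map (fun source => (PySem.Dict.mk source).getD "word_count" 0)).sum
  let lines : List String := [
    "# Confluence Export Index Stats",
    "",
    "- Sources: " ++ PySem.Int.toStr (PySem.List.len sources),
    "- Files: " ++ PySem.Int.toStr file_count,
    "- Words: " ++ PySem.Int.toStr word_count]
  PySem.Str.join "\n" lines ++ "\n"

-- ===== PORT B =====
-- recursive helper `_tally` from Source B: (count, total files, total words)
def pvTally : List (List (String × Int)) → Int × Int × Int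
  | [] => (0, 0, 0)
  | head :: rest =>
      let t := pvTally rest
      (t.1 + 1,
       (PySem.Dict.mk head).getD "file_count" 0 + t.2.1,
       (PySem.Dict.mk head).getD "word_count" 0 + t.2.2)

def render_root_stats_alt (registry : List (String × List (List (String × Int)))) : String :=
  let t := pvTally ((PySem.Dict.mk registry).getD "sources" [])
  "# Confluence Export Index Stats\n\n- Sources: " ++ PySem.Int.toStr t.1
    ++ "\n- Files: " ++ PySem.Int.toStr t.2.1
    ++ "\n- Words: " ++ PySem.Int.toStr t.2.2 ++ "\n"

-- ===== PRECONDITION & SPEC =====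
def Spec_render_root_stats (registry : List (String × List (List (String × Int)))) (out : String) : Prop := out = render_root_stats_alt registry
instance (registry : List (String × List (List (String × Int)))) (out : String) : Decidable (Spec_render_root_stats registry out) := by unfold Spec_render_root_stats; infer_instance

-- ===== CLAIM =====
def Claim_equal_render_root_stats : Prop := ∀ (registry : List (String × List (List (String × Int)))), Dom_render_root_stats registry → Spec_render_root_stats registry (render_root_stats registry)

-- ===== LEMMAS AND PROOFS =====

-- the recursive tally computes (length, sum of files, sum of words)
theorem pvTally_eq (l : List (List (String × Int))) :
    pvTally l = ((PySem.List.len l : Int),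
      (l.map (fun s => (PySem.Dict.mk s).getD "file_count" 0)).sum,
      (l.map (fun s => (PySem.Dict.mk s).getD "word_count" 0)).sum) := by
  induction l with
  | nil => simp [pvTally, PySem.List.len]
  | cons x xs ih =>
      simp [pvTally, ih, PySem.List.len]

-- joining the five-line list with '\n' equals the flat template
theorem pv_join_template (s2 s3 s4 : String) :
    PySem.Str.join "\n" ["# Confluence Export Index Stats", "",
      "- Sources: " ++ s2, "- Files: " ++ s3, "- Words: " ++ s4] ++ "\n"
      = "# Confluence Export Index Stats\n\n- Sources: " ++ s2
        ++ "\n- Files: " ++ s3 ++ "\n- Words: " ++ s4 ++ "\n" := by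
  apply String.ext
  simp [PySem.Str.join, PySem.Chars.join, List.intercalate]

-- ===== VERDICT =====
theorem render_root_stats_spec : Claim_equal_render_root_stats := by
  intro registry _
  unfold Spec_render_root_stats render_root_stats render_root_stats_alt
  simp only [pvTally_eq, pv_join_template]
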